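-- pv_equiv track=rewrite | github.com/nashibrana25-code/AI-Cafe-Analyst | api/index.py | _flex_str
-- ===== SOURCE A (Python) =====
-- def _flex_str(row, key_options):
--     """Extract a string value from a row, trying multiple possible column names."""
--     for k in key_options:
--         for rk in row:
--             if rk.strip().lower().replace(' ', '_') == k:
--                 v = str(row[rk]).strip()
--                 if v and v.lower() not in ('nan', 'n/a', 'none', ''):
--                     return v
--     return ''
-- ===== SOURCE B (Python) =====
-- def _flex_str(row, key_options):
--     """Extract a string value from a row, trying multiple possible column names."""
--     rank = {}
--     for i, k in enumerate(key_options):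
--         rank.setdefault(k, i)
--     best_r = None
--     best_v = ''
--     for rk in row:
--         r = rank.get(rk.strip().lower().replace(' ', '_'))
--         if r is None or (best_r is not None and r >= best_r):
--             continue
--         v = str(row[rk]).strip()
--         if v and v.lower() not in ('nan', 'n/a', 'none', ''):
--             best_r, best_v = r, v
--     return best_v
-- ===== Notes on version B (the rewrite author's own statement) =====
-- stated objective: alternative
-- what changed: B replaces A's nested priority search with early return by a selection scan: it precomputes each key option's first index (rank), then makes one pass over the whole row keeping the first valid value of strictly smallest rank, instead of rescanning the row per key option.
import Mathlib
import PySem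

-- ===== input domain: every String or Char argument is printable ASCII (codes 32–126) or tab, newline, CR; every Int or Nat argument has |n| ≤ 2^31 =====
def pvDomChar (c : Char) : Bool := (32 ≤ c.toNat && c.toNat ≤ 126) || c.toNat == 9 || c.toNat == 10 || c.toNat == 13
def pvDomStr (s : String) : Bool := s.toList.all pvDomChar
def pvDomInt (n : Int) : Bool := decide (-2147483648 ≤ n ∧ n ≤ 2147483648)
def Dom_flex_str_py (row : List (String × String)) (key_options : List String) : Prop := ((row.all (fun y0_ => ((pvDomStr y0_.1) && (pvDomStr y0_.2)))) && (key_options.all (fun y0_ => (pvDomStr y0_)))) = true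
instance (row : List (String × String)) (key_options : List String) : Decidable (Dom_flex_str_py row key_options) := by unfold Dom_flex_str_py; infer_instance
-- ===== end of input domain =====

-- B replaces A's nested priority search (early return per key option) by a single
-- selection scan over the row keeping the first valid value of smallest option rank
-- (objective: alternative).

-- Shared Python semantics: row[rk] (dict lookup, first match in the association list)
def pvLookup (row : List (String × String)) (rk : String) : String :=
  (PySem.Dict.mk row).getD rk ""

-- rk.strip().lower().replace(' ', '_')
def pvNorm (s : String) : String :=
  PySem.Str.replace (PySem.Str.lower (PySem.Str.strip s)) " " "_"

-- v and v.lower() not in ('nan', 'n/a', 'none', '')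
def pvValid (v : String) : Bool :=
  v != "" && !(["nan", "n/a", "none", ""].contains (PySem.Str.lower v))

-- ===== PORT A =====
-- inner loop: for rk in row: if rk.strip().lower().replace(' ','_') == k: …
def pvInnerA (row : List (String × String)) (k : String) :
    List (String × String) → Option String
  | [] => none
  | p :: rest =>
    if pvNorm p.1 == k then
      let v := PySem.Str.strip (pvLookup row p.1)
      if pvValid v then some v else pvInnerA row k rest
    else pvInnerA row k rest

-- outer loop: for k in key_options: …; return ''
def pvOuterA (row : List (String × String)) : List String → String
  | [] => ""
  | k :: ks =>
    match pvInnerA row k row with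
    | some v => v
    | none => pvOuterA row ks

def flex_str_py (row : List (String × String)) (key_options : List String) : String :=
  pvOuterA row key_options

-- ===== PORT B =====
-- first loop: for i, k in enumerate(key_options): rank.setdefault(k, i)
def pvRank : List String → Nat → PySem.Dict String Nat → PySem.Dict String Nat
  | [], _, d => d
  | k :: ks, i, d => pvRank ks (i + 1) (d.setdefault k i)

-- second loop: for rk in row: … keep (best_r, best_v); return best_v at the end
def pvScanB (row : List (String × String)) (rank : PySem.Dict String Nat) :
    List (String × String) → Option (Nat × String) → String
  | [], best => match best with | some b => b.2 | none => ""
  | p :: rest, best =>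
    match rank.get? (pvNorm p.1) with
    | none => pvScanB row rank rest best
    | some r =>
      if (match best with | some b => decide (b.1 ≤ r) | none => false) then
        pvScanB row rank rest best
      else
        let v := PySem.Str.strip (pvLookup row p.1)
        if pvValid v then pvScanB row rank rest (some (r, v))
        else pvScanB row rank rest best

def flex_str_py_alt (row : List (String × String)) (key_options : List String) : String :=
  pvScanB row (pvRank key_options 0 PySem.Dict.empty) row none

-- ===== PRECONDITION & SPEC =====
def Spec_flex_str_py (row : List (String × String)) (key_options : List String) (out : String) : Prop := out = flex_str_py_alt row key_options
instance (row : List (String × String)) (key_options : List String) (out : String) : Decidable (Spec_flex_str_py row key_options out) := by unfold Spec_flex_str_py; infer_instance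

-- ===== CLAIM (what is proved, stated in full; the proofs are below) =====
def Claim_equal_flex_str_py : Prop := ∀ (row : List (String × String)) (key_options : List String), Dom_flex_str_py row key_options → Spec_flex_str_py row key_options (flex_str_py row key_options)

-- ===== LEMMAS AND PROOFS =====

-- proof-side reference: first index of s in ks
def pvIdx? : List String → String → Option Nat
  | [], _ => none
  | k :: ks, s => if k == s then some 0 else (pvIdx? ks s).map (· + 1)

-- candidate produced by a row entry: (rank of its normalized key, its stripped value)
def pvG (row : List (String × String)) (ks : List String) (p : String × String) :
    Option (Nat × String) :=
  (pvIdx? ks (pvNorm p.1)).bind fun r =>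
    let v := PySem.Str.strip (pvLookup row p.1)
    if pvValid v then some (r, v) else none

def pvCands (row : List (String × String)) (ks : List String)
    (l : List (String × String)) : List (Nat × String) :=
  l.filterMap (pvG row ks)

-- keep the first candidate of strictly smallest rank
def pvMin2 (b : Option (Nat × String)) (c : Nat × String) : Option (Nat × String) :=
  match b with
  | none => some c
  | some b' => if c.1 < b'.1 then some c else some b'

def pvOut : Option (Nat × String) → String
  | some b => b.2
  | none => ""

theorem pvRank_get? (ks : List String) (i : Nat) (d : PySem.Dict String Nat)
    (s : String) :
    (pvRank ks i d).get? s = (d.get? s).orElse (fun _ => (pvIdx? ks s).map (· + i)) := by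
  induction ks generalizing i d with
  | nil => simp [pvRank, pvIdx?]
  | cons k ks ih =>
    simp only [pvRank, pvIdx?, ih]
    by_cases hc : d.contains k = true
    · rw [PySem.Dict.setdefault_of_contains _ _ hc]
      by_cases hk : k == s
      · have hks : k = s := by simpa using hk
        subst hks
        rcases h : d.get? k with _ | v
        · rw [PySem.Dict.contains_eq_isSome_get?, h] at hc; simp at hc
        · rfl
      · cases d.get? s <;>
          simp [hk, Option.map_map, Function.comp_def, Nat.add_comm, Nat.add_left_comm]
    · rw [PySem.Dict.setdefault_of_not_contains _ _ (by simpa using hc)]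
      by_cases hk : k == s
      · have hks : k = s := by simpa using hk
        subst hks
        have hn : d.get? k = none := by
          rw [PySem.Dict.contains_eq_isSome_get?] at hc
          cases h2 : d.get? k <;> simp [h2] at hc ⊢
        rw [PySem.Dict.get?_insert_self, hn]
        simp
      · have hne : s ≠ k := fun h => hk (by simp [h])
        rw [PySem.Dict.get?_insert_of_ne _ _ hne]
        cases d.get? s <;>
          simp [hk, Option.map_map, Function.comp_def, Nat.add_comm, Nat.add_left_comm]

-- B's scan is a fold of pvMin2 over the candidate list
theorem pvScanB_eq_fold (row : List (String × String)) (ks : List String)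
    (rank : PySem.Dict String Nat)
    (hr : ∀ s, rank.get? s = pvIdx? ks s)
    (l : List (String × String)) (best : Option (Nat × String)) :
    pvScanB row rank l best = pvOut ((pvCands row ks l).foldl pvMin2 best) := by
  induction l generalizing best with
  | nil => cases best <;> simp [pvScanB, pvCands, pvOut]
  | cons p rest ih =>
    simp only [pvCands] at ih ⊢
    rw [List.filterMap_cons]
    simp only [pvScanB, hr]
    rcases hi : pvIdx? ks (pvNorm p.1) with _ | r
    · have hg : pvG row ks p = none := by simp [pvG, hi]
      simp [hg, ih]
    · by_cases hv : pvValid (PySem.Str.strip (pvLookup row p.1)) = true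
      · have hg : pvG row ks p = some (r, PySem.Str.strip (pvLookup row p.1)) := by
          simp [pvG, hi, hv]
        rcases best with _ | ⟨br, bv⟩
        · simp [hg, hv, ih, pvMin2]
        · by_cases hle : br ≤ r
          · have hnl : ¬ r < br := by omega
            simp [hg, hle, ih, pvMin2, hnl]
          · have hl : r < br := by omega
            simp [hg, hle, hv, ih, pvMin2, hl]
      · have hg : pvG row ks p = none := by simp [pvG, hi, hv]
        rcases best with _ | ⟨br, bv⟩
        · simp [hg, hv, ih]
        · by_cases hle : br ≤ r <;> simp [hg, hle, hv, ih]

-- a rank-0 candidate in the accumulator is never replaced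
theorem pvFold_zero_absorb (x : String) (cs : List (Nat × String)) :
    cs.foldl pvMin2 (some (0, x)) = some (0, x) := by
  induction cs with
  | nil => rfl
  | cons c rest ih => simp [pvMin2, ih]

-- if A's inner scan finds v, the fold over candidates of (k::ks) yields (0, v)
theorem pvFold_of_inner_some (row : List (String × String)) (k : String)
    (ks : List String) (v : String) (l : List (String × String))
    (b : Option (Nat × String))
    (hb : b = none ∨ ∃ r x, b = some (r, x) ∧ 0 < r)
    (hi : pvInnerA row k l = some v) :
    (pvCands row (k :: ks) l).foldl pvMin2 b = some (0, v) := by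
  induction l generalizing b with
  | nil => simp [pvInnerA] at hi
  | cons p rest ih =>
    simp only [pvInnerA] at hi
    simp only [pvCands] at ih ⊢
    rw [List.filterMap_cons]
    by_cases hk : pvNorm p.1 == k
    · have hkk : pvNorm p.1 = k := by simpa using hk
      rw [if_pos hk] at hi
      by_cases hv : pvValid (PySem.Str.strip (pvLookup row p.1)) = true
      · rw [if_pos hv] at hi
        have hveq : PySem.Str.strip (pvLookup row p.1) = v := by simpa using hi
        have hg : pvG row (k :: ks) p =
            some (0, PySem.Str.strip (pvLookup row p.1)) := by
          simp [pvG, pvIdx?, hkk, hv]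
        have hmin : pvMin2 b (0, PySem.Str.strip (pvLookup row p.1)) =
            some (0, PySem.Str.strip (pvLookup row p.1)) := by
          rcases hb with rfl | ⟨r, x, rfl, hr⟩
          · rfl
          · simp [pvMin2, hr]
        rw [hveq] at hg hmin
        simp [hg, List.foldl_cons, hmin, pvFold_zero_absorb]
      · rw [if_neg hv] at hi
        have hg : pvG row (k :: ks) p = none := by simp [pvG, pvIdx?, hkk, hv]
        rw [hg]
        exact ih b hb hi
    · have hkk : pvNorm p.1 ≠ k := by simpa using hk
      rw [if_neg hk] at hi
      have hke : (k == pvNorm p.1) = false := by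
        exact beq_eq_false_iff_ne.2 fun h => hkk h.symm
      rcases hj : pvIdx? ks (pvNorm p.1) with _ | r
      · have hg : pvG row (k :: ks) p = none := by simp [pvG, pvIdx?, hke, hj]
        rw [hg]
        exact ih b hb hi
      · by_cases hv : pvValid (PySem.Str.strip (pvLookup row p.1)) = true
        · have hg : pvG row (k :: ks) p =
              some (r + 1, PySem.Str.strip (pvLookup row p.1)) := by
            simp [pvG, pvIdx?, hke, hj, hv]
          rw [hg, List.foldl_cons]
          apply ih _ _ hi
          rcases hb with rfl | ⟨r', x, rfl, hr⟩
          · exact Or.inr ⟨r + 1, _, rfl, by omega⟩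
          · simp only [pvMin2]
            split
            · exact Or.inr ⟨r + 1, _, rfl, by omega⟩
            · exact Or.inr ⟨r', x, rfl, hr⟩
        · have hg : pvG row (k :: ks) p = none := by simp [pvG, pvIdx?, hke, hj, hv]
          rw [hg]
          exact ih b hb hi

-- if A's inner scan fails, the candidates of (k::ks) are those of ks shifted by one
theorem pvCands_of_inner_none (row : List (String × String)) (k : String)
    (ks : List String) (l : List (String × String))
    (hi : pvInnerA row k l = none) :
    pvCands row (k :: ks) l = (pvCands row ks l).map (fun c => (c.1 + 1, c.2)) := by
  induction l with
  | nil => rfl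
  | cons p rest ih =>
    simp only [pvInnerA] at hi
    simp only [pvCands] at ih ⊢
    rw [List.filterMap_cons, List.filterMap_cons]
    by_cases hk : pvNorm p.1 == k
    · have hkk : pvNorm p.1 = k := by simpa using hk
      rw [if_pos hk] at hi
      by_cases hv : pvValid (PySem.Str.strip (pvLookup row p.1)) = true
      · rw [if_pos hv] at hi; exact absurd hi (by simp)
      · rw [if_neg hv] at hi
        have hg1 : pvG row (k :: ks) p = none := by simp [pvG, pvIdx?, hkk, hv]
        have hg2 : pvG row ks p = none := by
          simp only [pvG]
          rcases pvIdx? ks (pvNorm p.1) with _ | r <;> simp [hv]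
        rw [hg1, hg2]
        simpa using ih hi
    · have hkk : pvNorm p.1 ≠ k := by simpa using hk
      rw [if_neg hk] at hi
      have hke : (k == pvNorm p.1) = false := by
        exact beq_eq_false_iff_ne.2 fun h => hkk h.symm
      rcases hj : pvIdx? ks (pvNorm p.1) with _ | r
      · have hg1 : pvG row (k :: ks) p = none := by simp [pvG, pvIdx?, hke, hj]
        have hg2 : pvG row ks p = none := by simp [pvG, hj]
        rw [hg1, hg2]
        simpa using ih hi
      · by_cases hv : pvValid (PySem.Str.strip (pvLookup row p.1)) = true
        · have hg1 : pvG row (k :: ks) p =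
              some (r + 1, PySem.Str.strip (pvLookup row p.1)) := by
            simp [pvG, pvIdx?, hke, hj, hv]
          have hg2 : pvG row ks p =
              some (r, PySem.Str.strip (pvLookup row p.1)) := by
            simp [pvG, hj, hv]
          rw [hg1, hg2, List.map_cons]
          exact congrArg _ (by simpa using ih hi)
        · have hg1 : pvG row (k :: ks) p = none := by simp [pvG, pvIdx?, hke, hj, hv]
          have hg2 : pvG row ks p = none := by simp [pvG, hj, hv]
          rw [hg1, hg2]
          simpa using ih hi

-- the fold commutes with shifting every rank by one
theorem pvFold_map_succ (cs : List (Nat × String)) (b : Option (Nat × String)) :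
    (cs.map (fun c => (c.1 + 1, c.2))).foldl pvMin2 (b.map (fun c => (c.1 + 1, c.2)))
      = (cs.foldl pvMin2 b).map (fun c => (c.1 + 1, c.2)) := by
  induction cs generalizing b with
  | nil => rfl
  | cons c rest ih =>
    simp only [List.map_cons, List.foldl_cons, ← ih]
    congr 1
    rcases b with _ | ⟨br, bv⟩
    · rfl
    · simp only [Option.map_some, pvMin2]
      by_cases h : c.1 < br
      · have h1 : c.1 + 1 < br + 1 := by omega
        simp [h, h1]
      · have h1 : ¬ c.1 + 1 < br + 1 := by omega
        simp [h, h1]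

theorem pvOut_map_succ (b : Option (Nat × String)) :
    pvOut (b.map (fun c => (c.1 + 1, c.2))) = pvOut b := by
  cases b <;> rfl

-- A's nested loops compute the minimal-rank candidate value
theorem pvOuterA_char (row : List (String × String)) (ks : List String) :
    pvOuterA row ks = pvOut ((pvCands row ks row).foldl pvMin2 none) := by
  induction ks with
  | nil =>
    have : pvCands row [] row = [] := by
      simp [pvCands, pvG, pvIdx?]
    simp [pvOuterA, this, pvOut]
  | cons k ks ih =>
    simp only [pvOuterA]
    rcases hi : pvInnerA row k row with _ | v
    · rw [pvCands_of_inner_none row k ks row hi]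
      have := pvFold_map_succ (pvCands row ks row) none
      simp only [Option.map_none] at this
      rw [this, pvOut_map_succ, ih]
    · rw [pvFold_of_inner_some row k ks v row none (Or.inl rfl) hi]
      rfl

-- ===== VERDICT (by name: the statement is the Claim_ definition above) =====
theorem flex_str_py_spec : Claim_equal_flex_str_py := by
  intro row ks _
  unfold Spec_flex_str_py flex_str_py flex_str_py_alt
  rw [pvOuterA_char row ks]
  rw [pvScanB_eq_fold row ks _ (fun s => by
    rw [pvRank_get? ks 0 PySem.Dict.empty s]
    simp [PySem.Dict.get?_empty]) row none]
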